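-- pv_equiv track=rewrite | github.com/elspiderma/uaviak-timetable | src/parser/utils.py | ittr_string_with_index
-- ===== SOURCE A (Python) =====
-- import typing
--
-- def ittr_string_with_index(s: str, revers: bool = False) -> typing.Generator[tuple[int, str], None, None]:
--     """
--     Итеррирует строку.
--
--     Args:
--         s: Иттерируемая строка.
--         revers: Если `True`, то строка иттерируется в обратном порятке.
--     """
--     if not revers:
--         ittr = s
--         index = 0
--         step = 1
--     else:
--         ittr = reversed(s)
--         index = len(s) -1
--         step = -1
--
--     for char in ittr:
--         yield index, char
--         index += step
-- ===== SOURCE B (Python) =====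
-- def ittr_string_with_index(s, revers=False):
--     pairs = list(enumerate(s))
--     if revers:
--         pairs.reverse()
--     yield from pairs
-- ===== Notes on version B (the rewrite author's own statement) =====
-- stated objective: simpler
-- what changed: Instead of iterating the (possibly reversed) character stream while maintaining an index-plus-step accumulator, B materialises the forward (index, char) pair list once with enumerate and, for the reversed order, reverses that finished pair list in a second stage.
import Mathlib
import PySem

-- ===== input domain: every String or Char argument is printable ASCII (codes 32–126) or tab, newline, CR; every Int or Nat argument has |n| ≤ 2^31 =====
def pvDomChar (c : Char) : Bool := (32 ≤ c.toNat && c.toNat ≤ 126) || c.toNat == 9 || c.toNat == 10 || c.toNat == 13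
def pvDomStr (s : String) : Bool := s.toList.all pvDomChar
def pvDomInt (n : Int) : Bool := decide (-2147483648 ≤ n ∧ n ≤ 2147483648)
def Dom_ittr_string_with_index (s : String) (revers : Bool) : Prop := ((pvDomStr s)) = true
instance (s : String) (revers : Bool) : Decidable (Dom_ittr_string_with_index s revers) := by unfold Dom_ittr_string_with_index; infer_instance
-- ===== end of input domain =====

-- B replaces A's on-the-fly index-plus-step accumulator over the (possibly reversed) character
-- stream by two stages: enumerate the string forward once, then reverse the finished pair list
-- when the reversed order is requested: simpler decomposition, same O(n) cost.

-- ===== PORT A =====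
-- the for-loop over the character iterator, carrying (index, step) exactly as A does
def ittrAuxA : List Char → Int → Int → List (Int × String)
  | [], _, _ => []
  | c :: rest, index, step => (index, String.ofList [c]) :: ittrAuxA rest (index + step) step

def ittr_string_with_index (s : String) (revers : Bool) : List (Int × String) :=
  if !revers then
    ittrAuxA s.toList 0 1
  else
    ittrAuxA s.toList.reverse (PySem.Str.len s - 1) (-1)

-- ===== PORT B =====
def ittr_string_with_index_alt (s : String) (revers : Bool) : List (Int × String) :=
  let pairs := (PySem.List.enumerate s.toList).map (fun p => (p.1, String.ofList [p.2]))
  if revers then pairs.reverse else pairs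

-- ===== PRECONDITION & SPEC =====
def Spec_ittr_string_with_index (s : String) (revers : Bool) (out : List (Int × String)) : Prop := out = ittr_string_with_index_alt s revers
instance (s : String) (revers : Bool) (out : List (Int × String)) : Decidable (Spec_ittr_string_with_index s revers out) := by unfold Spec_ittr_string_with_index; infer_instance

-- ===== CLAIM (what is proved, stated in full; the proofs are below) =====
def Claim_equal_ittr_string_with_index : Prop := ∀ (s : String) (revers : Bool), Dom_ittr_string_with_index s revers → Spec_ittr_string_with_index s revers (ittr_string_with_index s revers)

-- ===== LEMMAS AND PROOFS =====

-- B's per-pair body, named for the proofs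
def fB (p : Int × Char) : Int × String := (p.1, String.ofList [p.2])

theorem fwd_aux (cs : List Char) : ∀ n : Int,
    ittrAuxA cs n 1 = (PySem.List.enumerate cs n).map fB := by
  induction cs with
  | nil => intro n; simp [ittrAuxA, PySem.List.enumerate_nil]
  | cons c rest ih =>
    intro n
    simp [ittrAuxA, PySem.List.enumerate_cons, fB, ih]

theorem rev_aux (cs : List Char) : ∀ n : Int,
    ittrAuxA cs.reverse (n + cs.length - 1) (-1)
      = ((PySem.List.enumerate cs n).map fB).reverse := by
  induction cs using List.reverseRecOn with
  | nil => intro n; simp [ittrAuxA, PySem.List.enumerate_nil]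
  | append_singleton xs x ih =>
    intro n
    rw [PySem.List.enumerate_append]
    simp only [List.reverse_append, List.reverse_singleton, List.singleton_append,
      List.length_append, List.length_cons, List.length_nil, List.map_append,
      PySem.List.enumerate_cons, PySem.List.enumerate_nil, List.map_cons, List.map_nil,
      List.reverse_append, List.reverse_cons, List.reverse_nil, List.nil_append,
      List.singleton_append, ittrAuxA, fB]
    push_cast
    have e1 : n + ((xs.length : Int) + 1) - 1 = n + xs.length := by ring
    have e2 : n + ((xs.length : Int) + 1) - 1 + -1 = n + xs.length - 1 := by ring
    rw [e1, e2] at *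
    have := ih n
    rw [this]

-- ===== VERDICT (by name: the statement is the Claim_ definition above) =====

theorem ittr_string_with_index_spec : Claim_equal_ittr_string_with_index := by
  intro s revers _
  unfold Spec_ittr_string_with_index ittr_string_with_index ittr_string_with_index_alt
  cases revers with
  | false => simpa [fB] using fwd_aux s.toList 0
  | true =>
    have := rev_aux s.toList 0
    simp only [zero_add] at this
    simpa [fB, PySem.Str.len] using this
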